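-- pv_equiv track=rewrite | github.com/HarrisonMc555/adventofcode | 2015/day15b.py | get_proportions_buffer
-- ===== SOURCE A (Python) =====
-- BUFFER = 15
--
-- def buffer_range(num):
--     return range(num - BUFFER, num + BUFFER +1)
--
-- def get_proportions_buffer(proportions):
--     def helper(ps):
--         if not ps:
--             yield []
--             return
--         for p in buffer_range(ps[0]):
--             for other in helper(ps[1:]):
--                 yield [p] + other
--
--     for ps in helper(proportions[:-1]):
--         yield ps + [NUM_INGREDIENTS - sum(ps)]
--
-- NUM_INGREDIENTS = 100
-- ===== SOURCE B (Python) =====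
-- BUFFER = 15
-- NUM_INGREDIENTS = 100
--
-- def buffer_range(num):
--     return range(num - BUFFER, num + BUFFER + 1)
--
-- def get_proportions_buffer(proportions):
--     # Iterative Cartesian product: grow the list of partial combinations
--     # one ingredient at a time (left fold), instead of A's recursive generator.
--     combos = [[]]
--     for p in proportions[:-1]:
--         combos = [c + [q] for c in combos for q in buffer_range(p)]
--     for ps in combos:
--         yield ps + [NUM_INGREDIENTS - sum(ps)]
-- ===== Notes on version B (the rewrite author's own statement) =====
-- stated objective: alternative
-- what changed: Replaces A's recursive generator helper (right-nested Cartesian product built per element) with an iterative left fold that grows the full list of partial combinations one ingredient at a time.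
import Mathlib
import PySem

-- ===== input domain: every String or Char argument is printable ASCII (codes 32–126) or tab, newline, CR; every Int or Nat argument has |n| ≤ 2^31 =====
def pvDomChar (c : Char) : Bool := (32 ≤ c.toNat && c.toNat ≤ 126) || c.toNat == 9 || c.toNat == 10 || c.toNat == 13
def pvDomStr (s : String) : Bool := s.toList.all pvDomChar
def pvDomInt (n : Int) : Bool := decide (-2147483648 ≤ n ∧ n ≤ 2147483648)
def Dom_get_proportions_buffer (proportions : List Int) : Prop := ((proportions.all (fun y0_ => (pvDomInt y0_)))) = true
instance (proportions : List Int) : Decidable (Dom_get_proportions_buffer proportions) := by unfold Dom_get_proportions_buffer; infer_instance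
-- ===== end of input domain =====

-- B replaces A's recursive generator helper by an iterative left-fold Cartesian product (alternative decomposition, same cost).

-- ===== PORT A =====
-- buffer_range(num) = range(num - 15, num + 15 + 1)
def pvBufferRangeA (num : Int) : List Int := PySem.List.pyRange (num - 15) (num + 15 + 1) 1

-- A's recursive generator 'helper' (ps[1:] on a nonempty list is its tail)
def pvHelperA : List Int → List (List Int)
  | [] => [[]]
  | p :: rest => (pvBufferRangeA p).flatMap (fun x => (pvHelperA rest).map (fun other => [x] ++ other))

def get_proportions_buffer (proportions : List Int) : List (List Int) :=
  (pvHelperA (PySem.List.slice proportions none (some (-1)))).map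
    (fun ps => ps ++ [100 - ps.sum])

-- ===== PORT B =====
def pvBufferRangeB (num : Int) : List Int := PySem.List.pyRange (num - 15) (num + 15 + 1) 1

def get_proportions_buffer_alt (proportions : List Int) : List (List Int) :=
  let combos := (PySem.List.slice proportions none (some (-1))).foldl
    (fun acc p => acc.flatMap (fun c => (pvBufferRangeB p).map (fun q => c ++ [q]))) [[]]
  combos.map (fun ps => ps ++ [100 - ps.sum])

-- ===== PRECONDITION & SPEC =====
def Spec_get_proportions_buffer (proportions : List Int) (out : List (List Int)) : Prop := out = get_proportions_buffer_alt proportions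
instance (proportions : List Int) (out : List (List Int)) : Decidable (Spec_get_proportions_buffer proportions out) := by unfold Spec_get_proportions_buffer; infer_instance

-- ===== CLAIM (what is proved, stated in full; the proofs are below) =====
def Claim_equal_get_proportions_buffer : Prop := ∀ (proportions : List Int), Dom_get_proportions_buffer proportions → Spec_get_proportions_buffer proportions (get_proportions_buffer proportions)

-- ===== LEMMAS AND PROOFS =====

-- B's left fold over ps, started from any accumulator, appends each element of
-- A's recursive product pvHelperA ps to each accumulated prefix.
theorem pv_foldl_eq_helper (ps : List Int) (acc : List (List Int)) :
    ps.foldl (fun acc p => acc.flatMap (fun c => (pvBufferRangeB p).map (fun q => c ++ [q]))) acc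
      = acc.flatMap (fun c => (pvHelperA ps).map (fun o => c ++ o)) := by
  induction ps generalizing acc with
  | nil => simp [pvHelperA]
  | cons p rest ih =>
    rw [List.foldl_cons, ih]
    simp [pvHelperA, pvBufferRangeB, pvBufferRangeA, List.flatMap_assoc,
      List.map_flatMap, List.flatMap_map, List.map_map, Function.comp_def, List.append_assoc]

-- ===== VERDICT (by name: the statement is the Claim_ definition above) =====
theorem get_proportions_buffer_spec : Claim_equal_get_proportions_buffer := by
  intro proportions _
  unfold Spec_get_proportions_buffer get_proportions_buffer get_proportions_buffer_alt
  rw [pv_foldl_eq_helper]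
  simp
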